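-- pv_equiv track=rewrite | github.com/lalai01/CapstoneEssayEvaluator | backend/evaluator.py | get_paragraph_number
-- ===== SOURCE A (Python) =====
-- def get_paragraph_number(text, offset):
--     paragraphs = text.split('\n\n')
--     char_count = 0
--     for i, para in enumerate(paragraphs):
--         char_count += len(para) + 2
--         if offset < char_count:
--             return i + 1
--     return 1
-- ===== SOURCE B (Python) =====
-- import bisect
-- import itertools
--
-- def get_paragraph_number(text, offset):
--     boundaries = list(itertools.accumulate(len(p) + 2 for p in text.split('\n\n')))
--     idx = bisect.bisect_right(boundaries, offset)
--     return idx + 1 if idx < len(boundaries) else 1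
-- ===== Notes on version B (the rewrite author's own statement) =====
-- stated objective: alternative
-- what changed: Replaces A's scan-until-hit loop carrying a running char_count with a precomputed cumulative-boundary list (itertools.accumulate) located by a single bisect_right binary search.
import Mathlib
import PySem

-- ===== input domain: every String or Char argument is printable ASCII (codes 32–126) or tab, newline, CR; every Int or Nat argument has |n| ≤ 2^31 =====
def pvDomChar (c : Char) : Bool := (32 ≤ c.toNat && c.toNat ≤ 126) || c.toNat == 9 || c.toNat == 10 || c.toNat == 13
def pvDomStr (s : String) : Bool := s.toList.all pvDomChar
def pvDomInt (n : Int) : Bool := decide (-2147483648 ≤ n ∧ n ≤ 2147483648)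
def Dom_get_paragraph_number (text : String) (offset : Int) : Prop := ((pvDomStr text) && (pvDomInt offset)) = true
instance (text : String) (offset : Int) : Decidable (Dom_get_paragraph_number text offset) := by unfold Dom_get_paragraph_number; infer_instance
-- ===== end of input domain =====

-- B replaces A's running-count scan loop by a cumulative boundary list plus one bisect_right lookup (alternative decomposition, same asymptotic cost).

-- ===== PORT A =====
-- the for-loop over enumerate(paragraphs) carrying char_count, with early return
def pvScanA (offset : Int) : List String → Int → Int → Int
  | [], _, _ => 1
  | p :: rest, i, cc =>
    let cc' := cc + (PySem.Str.len p : Int) + 2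
    if offset < cc' then i + 1 else pvScanA offset rest (i + 1) cc'

def get_paragraph_number (text : String) (offset : Int) : Int :=
  pvScanA offset ((PySem.Str.split? text "\n\n").getD []) 0 0

-- ===== PORT B =====
-- itertools.accumulate(len(p)+2 for p in paragraphs)
def pvAccum : List String → Int → List Int
  | [], _ => []
  | p :: rest, acc =>
    let b := acc + (PySem.Str.len p : Int) + 2
    b :: pvAccum rest b

-- bisect.bisect_right bs x: on the strictly increasing boundary list this is exactly
-- the number of elements ≤ x (exact on every input B feeds it, since pvAccum is strictly increasing)
def pvBisectRight (bs : List Int) (x : Int) : Int :=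
  ((bs.countP (fun b => decide (b ≤ x)) : Nat) : Int)

def get_paragraph_number_alt (text : String) (offset : Int) : Int :=
  let bs := pvAccum ((PySem.Str.split? text "\n\n").getD []) 0
  let idx := pvBisectRight bs offset
  if idx < (bs.length : Int) then idx + 1 else 1

-- ===== PRECONDITION & SPEC =====
def Spec_get_paragraph_number (text : String) (offset : Int) (out : Int) : Prop := out = get_paragraph_number_alt text offset
instance (text : String) (offset : Int) (out : Int) : Decidable (Spec_get_paragraph_number text offset out) := by unfold Spec_get_paragraph_number; infer_instance

-- ===== CLAIM (what is proved, stated in full; the proofs are below) =====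
def Claim_equal_get_paragraph_number : Prop := ∀ (text : String) (offset : Int), Dom_get_paragraph_number text offset → Spec_get_paragraph_number text offset (get_paragraph_number text offset)

-- ===== LEMMAS AND PROOFS =====

lemma pvAccum_mem_gt : ∀ (ps : List String) (acc b : Int), b ∈ pvAccum ps acc → acc < b := by
  intro ps
  induction ps with
  | nil => intro acc b h; simp [pvAccum] at h
  | cons p rest ih =>
    intro acc b h
    simp only [pvAccum, List.mem_cons] at h
    have hlen : (0 : Int) ≤ (PySem.Str.len p : Int) := Int.natCast_nonneg _
    rcases h with h | h
    · omega
    · have := ih _ _ h; omega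

lemma pvScanA_eq (offset : Int) : ∀ (ps : List String) (i cc : Int),
    pvScanA offset ps i cc =
      (if ((pvAccum ps cc).countP (fun b => decide (b ≤ offset)) : Int) < ((pvAccum ps cc).length : Int)
       then i + ((pvAccum ps cc).countP (fun b => decide (b ≤ offset)) : Int) + 1
       else 1) := by
  intro ps
  induction ps with
  | nil => intro i cc; simp [pvScanA, pvAccum]
  | cons p rest ih =>
    intro i cc
    simp only [pvScanA, pvAccum]
    set cc' := cc + (PySem.Str.len p : Int) + 2 with hcc'
    by_cases h : offset < cc'
    · -- every boundary in the tail exceeds cc' > offset, so the count is 0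
      have hz : (pvAccum rest cc').countP (fun b => decide (b ≤ offset)) = 0 := by
        rw [List.countP_eq_zero]
        intro b hb
        have := pvAccum_mem_gt rest cc' b hb
        simp only [decide_eq_true_eq]
        omega
      simp only [if_pos h, List.countP_cons, hz]
      have : ¬ (cc' ≤ offset) := by omega
      simp [this]
    · have hle : cc' ≤ offset := by omega
      rw [if_neg h, ih (i + 1) cc']
      have hc : (cc' :: pvAccum rest cc').countP (fun b => decide (b ≤ offset))
          = (pvAccum rest cc').countP (fun b => decide (b ≤ offset)) + 1 := by
        simp [hle]
      rw [hc, List.length_cons]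
      split <;> split <;> push_cast at * <;> omega

-- ===== VERDICT (by name: the statement is the Claim_ definition above) =====
theorem get_paragraph_number_spec : Claim_equal_get_paragraph_number := by
  intro text offset _
  unfold Spec_get_paragraph_number get_paragraph_number get_paragraph_number_alt pvBisectRight
  dsimp only
  rw [pvScanA_eq]
  split <;> omega
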